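-- pv_equiv track=rewrite | github.com/kritikkandwal/Ai-powered-natural-language-query-engine-vscode | app/services/sql_generator.py | map_to_schema
-- ===== SOURCE A (Python) =====
-- def map_to_schema(term, schema):
--     term_lower = term.lower()
--     for table, columns in schema.items():
--         if term_lower == table:
--             return table
--         for col in columns:
--             if term_lower == col:
--                 return f"{table}.{col}"
--     return term
-- ===== SOURCE B (Python) =====
-- def map_to_schema(term, schema):
--     mapping = {}
--     for table, columns in schema.items():
--         mapping.setdefault(table, table)
--         for col in columns:
--             mapping.setdefault(col, f"{table}.{col}")
--     return mapping.get(term.lower(), term)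
-- ===== Notes on version B (the rewrite author's own statement) =====
-- stated objective: alternative
-- what changed: B builds a full first-match-wins lookup dict over the schema once (via setdefault) and answers with a single dict.get, instead of A's nested scan with early returns.
import Mathlib
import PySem

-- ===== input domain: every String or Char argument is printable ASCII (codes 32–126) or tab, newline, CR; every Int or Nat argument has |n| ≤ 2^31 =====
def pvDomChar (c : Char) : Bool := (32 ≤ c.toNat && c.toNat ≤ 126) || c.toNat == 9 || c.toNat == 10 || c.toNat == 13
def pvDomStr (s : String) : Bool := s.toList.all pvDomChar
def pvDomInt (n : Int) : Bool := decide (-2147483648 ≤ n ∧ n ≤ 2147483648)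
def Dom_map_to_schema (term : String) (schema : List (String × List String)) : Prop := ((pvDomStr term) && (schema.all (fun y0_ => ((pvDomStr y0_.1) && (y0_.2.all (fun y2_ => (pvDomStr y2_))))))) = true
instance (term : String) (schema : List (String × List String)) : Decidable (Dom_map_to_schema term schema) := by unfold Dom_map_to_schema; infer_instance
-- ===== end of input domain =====

-- B builds the whole term→schema-name index once with first-match-wins setdefault and answers by
-- one dict lookup, instead of A's nested early-return scan; objective: alternative (same cost).

-- ===== PORT A =====
-- A's inner 'for col in columns' loop: some r = the early return f"{table}.{col}", none = fall through
def mapA_inner (tl table : String) : List String → Option String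
  | [] => none
  | c :: cs => if tl == c then some (table ++ "." ++ c) else mapA_inner tl table cs

-- A's outer 'for table, columns in schema.items()' loop
def mapA_outer (tl term : String) : List (String × List String) → String
  | [] => term
  | (table, cols) :: rest =>
    if tl == table then table
    else
      match mapA_inner tl table cols with
      | some r => r
      | none => mapA_outer tl term rest

def map_to_schema (term : String) (schema : List (String × List String)) : String :=
  mapA_outer (PySem.Str.lower term) term schema

-- ===== PORT B =====
-- one schema entry: mapping.setdefault(table, table); then setdefault(col, f"{table}.{col}") per col
def mapB_entry (d : PySem.Dict String String) (e : String × List String) :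
    PySem.Dict String String :=
  e.2.foldl (fun d c => d.setdefault c (e.1 ++ "." ++ c)) (d.setdefault e.1 e.1)

def map_to_schema_alt (term : String) (schema : List (String × List String)) : String :=
  let mapping := schema.foldl mapB_entry PySem.Dict.empty
  mapping.getD (PySem.Str.lower term) term

-- ===== PRECONDITION & SPEC =====
def Spec_map_to_schema (term : String) (schema : List (String × List String)) (out : String) : Prop := out = map_to_schema_alt term schema
instance (term : String) (schema : List (String × List String)) (out : String) : Decidable (Spec_map_to_schema term schema out) := by unfold Spec_map_to_schema; infer_instance

-- ===== CLAIM (what is proved, stated in full; the proofs are below) =====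
def Claim_equal_map_to_schema : Prop := ∀ (term : String) (schema : List (String × List String)), Dom_map_to_schema term schema → Spec_map_to_schema term schema (map_to_schema term schema)

-- ===== LEMMAS AND PROOFS =====
-- The inner setdefault loop over one entry's columns: an existing binding for tl survives,
-- and a fresh tl gets exactly A's inner-scan result.
lemma inner_get? (tl table : String) (cols : List String) (d : PySem.Dict String String) :
    (cols.foldl (fun d c => d.setdefault c (table ++ "." ++ c)) d).get? tl =
      match d.get? tl with
      | some v => some v
      | none => mapA_inner tl table cols := by
  induction cols generalizing d with
  | nil => rw [List.foldl_nil]; cases d.get? tl <;> rfl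
  | cons c cs ih =>
    simp only [List.foldl_cons, ih, mapA_inner]
    by_cases h : tl = c
    · subst h
      rw [PySem.Dict.get?_setdefault_self]
      cases d.get? tl <;> simp
    · rw [PySem.Dict.get?_setdefault_of_ne _ _ h]
      simp [beq_iff_eq, h]

-- The whole index build: looking tl up in the finished dict is A's outer scan (first match wins).
lemma build_getD (tl term : String) (schema : List (String × List String))
    (d : PySem.Dict String String) :
    (schema.foldl mapB_entry d).getD tl term =
      match d.get? tl with
      | some v => v
      | none => mapA_outer tl term schema := by
  induction schema generalizing d with
  | nil =>
    rw [List.foldl_nil, PySem.Dict.getD_eq_get?_getD]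
    cases d.get? tl <;> simp [mapA_outer]
  | cons e rest ih =>
    obtain ⟨table, cols⟩ := e
    simp only [List.foldl_cons, ih, mapB_entry, mapA_outer, inner_get?]
    by_cases h : tl = table
    · subst h
      rw [PySem.Dict.get?_setdefault_self]
      cases d.get? tl <;> simp
    · rw [PySem.Dict.get?_setdefault_of_ne _ _ h]
      cases d.get? tl <;> simp [beq_iff_eq, h]

-- ===== VERDICT (by name: the statement is the Claim_ definition above) =====
theorem map_to_schema_spec : Claim_equal_map_to_schema := by
  intro term schema _
  unfold Spec_map_to_schema map_to_schema map_to_schema_alt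
  rw [build_getD, PySem.Dict.get?_empty]
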